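-- pv_equiv track=rewrite | github.com/JuanDi37/ruy-lopez-analysis | main.py | construir_matriz_transicion
-- ===== SOURCE A (Python) =====
-- def construir_matriz_transicion(partidas):
--     transiciones = {}
--     for partida in partidas:
--         movimientos = partida
--         for i in range(len(movimientos)-1):
--             estado_actual = movimientos[i]
--             estado_siguiente = movimientos[i+1]
--             if estado_actual not in transiciones:
--                 transiciones[estado_actual] = {}
--             if estado_siguiente not in transiciones[estado_actual]:
--                 transiciones[estado_actual][estado_siguiente] = 0
--             transiciones[estado_actual][estado_siguiente] += 1
--     return transiciones
-- ===== SOURCE B (Python) =====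
-- def construir_matriz_transicion(partidas):
--     # Collect every consecutive pair across all games into one flat list.
--     pares = [p for partida in partidas for p in zip(partida, partida[1:])]
--     # Distinct pairs and distinct source states, in first-occurrence order.
--     orden = list(dict.fromkeys(pares))
--     fuentes = list(dict.fromkeys(a for a, _ in orden))
--     # Declarative reconstruction: each count is read off the flat pair list directly.
--     return {a: {b: pares.count((a, b)) for (x, b) in orden if x == a} for a in fuentes}
-- ===== Notes on version B (the rewrite author's own statement) =====
-- stated objective: alternative
-- what changed: No incremental counting at all: B flattens all consecutive pairs into one list, deduplicates pairs and source states to fix the orders, and rebuilds the nested dict declaratively with each count computed by pares.count on the flat list, instead of A's single pass that increments a nested counter dict in place.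
import Mathlib
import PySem

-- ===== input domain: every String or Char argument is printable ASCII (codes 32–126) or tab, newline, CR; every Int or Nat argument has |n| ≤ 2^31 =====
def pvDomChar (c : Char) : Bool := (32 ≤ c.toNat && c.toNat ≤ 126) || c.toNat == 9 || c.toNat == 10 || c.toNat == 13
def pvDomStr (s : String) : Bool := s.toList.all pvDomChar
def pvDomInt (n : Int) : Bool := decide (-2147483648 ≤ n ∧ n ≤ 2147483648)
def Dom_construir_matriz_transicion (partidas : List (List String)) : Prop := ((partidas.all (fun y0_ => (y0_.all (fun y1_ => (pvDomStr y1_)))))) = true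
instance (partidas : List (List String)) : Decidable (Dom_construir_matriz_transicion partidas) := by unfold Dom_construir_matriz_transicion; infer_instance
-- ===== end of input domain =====

-- B discards A's incremental nested counter: it flattens all consecutive pairs, fixes the
-- key orders by deduplication, and reads each count off the flat list; proved equal to A.

-- ===== PORT A =====
def construir_matriz_transicion (partidas : List (List String)) : List (String × List (String × Int)) :=
  let transiciones : PySem.Dict String (PySem.Dict String Int) :=
    partidas.foldl (fun transiciones partida =>
      let movimientos := partida
      (PySem.List.pyRange 0 ((movimientos.length : Int) - 1) 1).foldl (fun transiciones i =>
        let estado_actual := PySem.List.pyGetD movimientos i ""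
        let estado_siguiente := PySem.List.pyGetD movimientos (i + 1) ""
        let transiciones :=
          if transiciones.contains estado_actual then transiciones
          else transiciones.insert estado_actual PySem.Dict.empty
        let inner := transiciones.getD estado_actual PySem.Dict.empty
        let inner :=
          if inner.contains estado_siguiente then inner
          else inner.insert estado_siguiente 0
        transiciones.insert estado_actual
          (inner.insert estado_siguiente (inner.getD estado_siguiente 0 + 1))) transiciones)
      PySem.Dict.empty
  transiciones.items.map (fun p => (p.1, p.2.items))

-- ===== PORT B =====
def construir_matriz_transicion_alt (partidas : List (List String)) : List (String × List (String × Int)) :=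
  -- pares = [p for partida in partidas for p in zip(partida, partida[1:])]
  let pares : List (String × String) :=
    partidas.flatMap (fun partida => partida.zip (PySem.List.slice partida (some 1) none))
  -- orden = list(dict.fromkeys(pares)) : distinct pairs, first-occurrence order
  let orden : List (String × String) := PySem.Set.ofList pares
  -- fuentes = list(dict.fromkeys(a for a, _ in orden))
  let fuentes : List String := PySem.Set.ofList (orden.map (fun q => q.1))
  -- {a: {b: pares.count((a, b)) for (x, b) in orden if x == a} for a in fuentes}
  fuentes.map (fun a =>
    (a, (orden.filter (fun q => q.1 == a)).map (fun q => (q.2, (pares.count (a, q.2) : Int)))))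

-- ===== PRECONDITION & SPEC =====
def Spec_construir_matriz_transicion (partidas : List (List String)) (out : List (String × List (String × Int))) : Prop := out = construir_matriz_transicion_alt partidas
instance (partidas : List (List String)) (out : List (String × List (String × Int))) : Decidable (Spec_construir_matriz_transicion partidas out) := by unfold Spec_construir_matriz_transicion; infer_instance

-- ===== CLAIM (what is proved, stated in full; the proofs are below) =====
def Claim_equal_construir_matriz_transicion : Prop := ∀ (partidas : List (List String)), Dom_construir_matriz_transicion partidas → Spec_construir_matriz_transicion partidas (construir_matriz_transicion partidas)

-- ===== LEMMAS AND PROOFS =====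

-- A's inner-loop body, as a function of the (current, next) pair.
def pvAStep (t : PySem.Dict String (PySem.Dict String Int)) (p : String × String) :
    PySem.Dict String (PySem.Dict String Int) :=
  let estado_actual := p.1
  let estado_siguiente := p.2
  let t :=
    if t.contains estado_actual then t
    else t.insert estado_actual PySem.Dict.empty
  let inner := t.getD estado_actual PySem.Dict.empty
  let inner :=
    if inner.contains estado_siguiente then inner
    else inner.insert estado_siguiente 0
  t.insert estado_actual (inner.insert estado_siguiente (inner.getD estado_siguiente 0 + 1))

-- the flat list of consecutive pairs of all games
def pvPairs (partidas : List (List String)) : List (String × String) :=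
  partidas.flatMap (fun l => l.zip l.tail)

-- canonical normal form of the nested dict determined by a pair list P
def pvInner (a : String) (P : List (String × String)) : List (String × Int) :=
  (PySem.Set.ofList ((P.filter (fun q => q.1 == a)).map (fun q => q.2))).map
    (fun b => (b, (P.count (a, b) : Int)))

def pvCanon (P : List (String × String)) : PySem.Dict String (PySem.Dict String Int) :=
  PySem.Dict.mk ((PySem.Set.ofList (P.map (fun q => q.1))).map
    (fun a => (a, PySem.Dict.mk (pvInner a P))))

lemma pvDictExt {κ ν : Type} {d e : PySem.Dict κ ν} (h : d.items = e.items) : d = e := by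
  cases d; cases e; cases h; rfl

lemma pvItemsMk {κ ν : Type} (l : List (κ × ν)) : (PySem.Dict.mk l).items = l := rfl

lemma pvInsertInsert {κ ν : Type} [BEq κ] [LawfulBEq κ] (d : PySem.Dict κ ν) (k : κ) (v w : ν) :
    (d.insert k v).insert k w = d.insert k w := by
  apply pvDictExt
  by_cases h : d.contains k = true
  · rw [PySem.Dict.items_insert_of_contains _ w (PySem.Dict.contains_insert_self d k v),
      PySem.Dict.items_insert_of_contains _ v h, PySem.Dict.items_insert_of_contains _ w h,
      List.map_map]
    apply List.map_congr_left
    intro p _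
    by_cases hp : (p.1 == k) = true <;> simp [hp]
  · rw [PySem.Dict.items_insert_of_contains _ w (PySem.Dict.contains_insert_self d k v),
      PySem.Dict.items_insert_of_not_contains _ v (by simpa using h),
      PySem.Dict.items_insert_of_not_contains _ w (by simpa using h),
      List.map_append]
    have hk : ∀ p ∈ d.items, (p.1 == k) = false := by
      intro p hp
      have : k ∉ d.keys := by
        intro hmem
        exact h ((PySem.Dict.contains_iff_mem_keys d k).mpr hmem)
      have hne : p.1 ≠ k := by
        intro he
        exact this (he ▸ PySem.Dict.mem_keys_of_mem_items d hp)
      simpa using hne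
    congr 1
    · conv_rhs => rw [← List.map_id d.items]
      apply List.map_congr_left
      intro p hp
      simp [hk p hp]
    · simp

lemma pvOfListAppendSingleton {α : Type} [BEq α] (l : List α) (x : α) :
    PySem.Set.ofList (l ++ [x]) = (PySem.Set.ofList l).add x := by
  rw [PySem.Set.ofList_eq_foldl, PySem.Set.ofList_eq_foldl, List.foldl_append]
  rfl

lemma pvOfListMapOfList {α β : Type} [BEq α] [LawfulBEq α] [BEq β] [LawfulBEq β]
    (l : List α) (f : α → β) :
    PySem.Set.ofList ((PySem.Set.ofList l).map f) = PySem.Set.ofList (l.map f) := by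
  induction l using List.reverseRecOn with
  | nil => rfl
  | append_singleton l x ih =>
    rw [pvOfListAppendSingleton]
    by_cases hx : x ∈ l
    · rw [PySem.Set.add_of_mem (by rw [PySem.Set.mem_ofList]; exact hx), ih, List.map_append,
        List.map_singleton, pvOfListAppendSingleton,
        PySem.Set.add_of_mem (by rw [PySem.Set.mem_ofList]; exact List.mem_map_of_mem hx)]
    · rw [PySem.Set.add_of_not_mem (by rw [PySem.Set.mem_ofList]; exact hx), List.map_append,
        List.map_singleton, pvOfListAppendSingleton, ih, List.map_append, List.map_singleton,
        pvOfListAppendSingleton]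

lemma pvOfListFilter {α : Type} [BEq α] [LawfulBEq α] (l : List α) (p : α → Bool) :
    (PySem.Set.ofList l).filter p = PySem.Set.ofList (l.filter p) := by
  induction l using List.reverseRecOn with
  | nil => rfl
  | append_singleton l x ih =>
    by_cases hx : x ∈ l <;> by_cases hp : p x = true
    all_goals
      simp [pvOfListAppendSingleton, PySem.Set.mem_ofList,
        List.filter_append, hp, hx, List.mem_filter, ih]

lemma pvOfListConstFst {β : Type} [BEq β] [LawfulBEq β] (a : String) (l : List (String × β))
    (h : ∀ q ∈ l, q.1 = a) :
    PySem.Set.ofList l = (PySem.Set.ofList (l.map (fun q => q.2))).map (fun b => (a, b)) := by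
  induction l using List.reverseRecOn with
  | nil => rfl
  | append_singleton l x ih =>
    have hx1 : x.1 = a := h x (by simp)
    have hl : ∀ q ∈ l, q.1 = a := fun q hq => h q (by simp [hq])
    rw [pvOfListAppendSingleton, List.map_append, List.map_singleton, pvOfListAppendSingleton]
    by_cases hx : x ∈ l
    · rw [PySem.Set.add_of_mem (by rw [PySem.Set.mem_ofList]; exact hx),
        PySem.Set.add_of_mem (by rw [PySem.Set.mem_ofList]; exact List.mem_map_of_mem hx),
        ih hl]
    · have hx2 : x.2 ∉ l.map (fun q => q.2) := by
        intro hm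
        obtain ⟨q, hq, hq2⟩ := List.mem_map.mp hm
        have : q = x := by
          ext
          · rw [hl q hq, hx1]
          · exact hq2
        exact hx (this ▸ hq)
      rw [PySem.Set.add_of_not_mem (by rw [PySem.Set.mem_ofList]; exact hx),
        PySem.Set.add_of_not_mem (by rw [PySem.Set.mem_ofList]; exact hx2),
        List.map_append, List.map_singleton, ih hl]
      have hxa : x = (a, x.2) := by rw [← hx1]
      rw [hxa]

lemma pvZipEqRange (l : List String) :
    l.zip l.tail = (List.range (l.length - 1)).map
      (fun i => (l.getD i "", l.getD (i + 1) "")) := by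
  apply List.ext_getElem
  · simp [List.length_zip, List.length_tail]
  · intro i h1 h2
    have hlen : i < l.length - 1 := by simpa using h2
    have hi : i < l.length := by omega
    have hi1 : i + 1 < l.length := by omega
    have hit : i < l.tail.length := by simp [List.length_tail]; omega
    rw [List.getElem_zip, List.getElem_map, List.getElem_range, List.getElem_tail]
    rw [List.getD_eq_getElem l "" hi, List.getD_eq_getElem l "" hi1]

lemma pvIdxFoldEqZip (l : List String) (t : PySem.Dict String (PySem.Dict String Int)) :
    (PySem.List.pyRange 0 ((l.length : Int) - 1) 1).foldl
      (fun t i => pvAStep t (PySem.List.pyGetD l i "", PySem.List.pyGetD l (i + 1) "")) t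
      = (l.zip l.tail).foldl pvAStep t := by
  cases l with
  | nil => rfl
  | cons x xs =>
    have h : (((x :: xs).length : Int)) - 1 = ((xs.length : Nat) : Int) := by
      simp [List.length_cons]
    rw [h, PySem.List.pyRange_zero_natCast, List.foldl_map, pvZipEqRange, List.foldl_map]
    have hlen : (x :: xs).length - 1 = xs.length := by simp
    rw [hlen]
    apply PySem.List.foldl_congr_mem
    intro acc i _
    have h1 : ((i : Int) + 1) = (((i + 1 : Nat) : Nat) : Int) := by push_cast; ring
    rw [h1, PySem.List.pyGetD_natCast, PySem.List.pyGetD_natCast]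

-- facts about the canonical dict
lemma pvCanonKeys (P : List (String × String)) :
    (pvCanon P).keys = PySem.Set.ofList (P.map (fun q => q.1)) := by
  unfold pvCanon
  rw [PySem.Dict.keys_mk, List.map_map]
  exact List.map_id _

lemma pvCanonContains (P : List (String × String)) (a : String) :
    (pvCanon P).contains a = true ↔ a ∈ P.map (fun q => q.1) := by
  rw [PySem.Dict.contains_eq_decide_mem_keys, pvCanonKeys]
  simp [PySem.Set.mem_ofList]

lemma pvCanonGetD (P : List (String × String)) (a : String) (h : a ∈ P.map (fun q => q.1)) :
    (pvCanon P).getD a PySem.Dict.empty = PySem.Dict.mk (pvInner a P) := by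
  have hn : (pvCanon P).keys.Nodup := by
    rw [pvCanonKeys]; exact PySem.Set.nodup_ofList _
  have hm : (a, PySem.Dict.mk (pvInner a P)) ∈ (pvCanon P).items :=
    List.mem_map_of_mem (by rw [PySem.Set.mem_ofList]; exact h)
  exact PySem.Dict.getD_of_mem_items _ hm hn _

lemma pvInnerKeys (a : String) (P : List (String × String)) :
    (pvInner a P).map (fun q => q.1)
      = PySem.Set.ofList ((P.filter (fun q => q.1 == a)).map (fun q => q.2)) := by
  unfold pvInner
  rw [List.map_map]
  exact List.map_id _

lemma pvInnerMem (a b : String) (P : List (String × String)) :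
    b ∈ (pvInner a P).map (fun q => q.1) ↔ (a, b) ∈ P := by
  rw [pvInnerKeys, PySem.Set.mem_ofList]
  constructor
  · intro hb
    obtain ⟨q, hq, rfl⟩ := List.mem_map.mp hb
    obtain ⟨hqP, hq1⟩ := List.mem_filter.mp hq
    have h1 : q.1 = a := by simpa using hq1
    have h2 : (a, q.2) = q := by rw [← h1]
    rw [h2]
    exact hqP
  · intro hb
    exact List.mem_map_of_mem (List.mem_filter.mpr ⟨hb, by simp⟩)

lemma pvInnerContains (a b : String) (P : List (String × String)) :
    (PySem.Dict.mk (pvInner a P)).contains b = true ↔ (a, b) ∈ P := by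
  rw [PySem.Dict.contains_eq_decide_mem_keys, PySem.Dict.keys_mk]
  simp only [decide_eq_true_eq]
  exact pvInnerMem a b P

lemma pvInnerGetD (a b : String) (P : List (String × String)) (h : (a, b) ∈ P) :
    (PySem.Dict.mk (pvInner a P)).getD b 0 = (P.count (a, b) : Int) := by
  have hb : b ∈ PySem.Set.ofList ((P.filter (fun q => q.1 == a)).map (fun q => q.2)) := by
    have := (pvInnerMem a b P).mpr h
    rwa [pvInnerKeys] at this
  have hm : (b, (P.count (a, b) : Int)) ∈ pvInner a P := List.mem_map_of_mem hb
  have hn : (PySem.Dict.mk (pvInner a P)).keys.Nodup := by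
    rw [PySem.Dict.keys_mk]
    have := pvInnerKeys a P
    rw [this]
    exact PySem.Set.nodup_ofList _
  exact PySem.Dict.getD_of_mem_items _ hm hn 0

-- inner lists under appending one pair
lemma pvInnerAppendOther (a' a b : String) (P : List (String × String)) (h : a' ≠ a) :
    pvInner a' (P ++ [(a, b)]) = pvInner a' P := by
  unfold pvInner
  have hfilter : (P ++ [(a, b)]).filter (fun q => q.1 == a') = P.filter (fun q => q.1 == a') := by
    rw [List.filter_append]
    simp [Ne.symm h]
  rw [hfilter]
  apply List.map_congr_left
  intro b' _
  have hcnt : (P ++ [(a, b)]).count (a', b') = P.count (a', b') := by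
    simp only [List.count_append, List.count_cons, List.count_nil]
    simp
    intro h'
    exact absurd h'.symm h
  rw [hcnt]

lemma pvInnerAppendNew (a b : String) (P : List (String × String)) (h : (a, b) ∉ P) :
    pvInner a (P ++ [(a, b)]) = pvInner a P ++ [(b, (1 : Int))] := by
  have hbmem : b ∉ (P.filter (fun q => q.1 == a)).map (fun q => q.2) := by
    intro hm
    exact h ((pvInnerMem a b P).mp (by rw [pvInnerKeys, PySem.Set.mem_ofList]; exact hm))
  unfold pvInner
  have hfilter : (P ++ [(a, b)]).filter (fun q => q.1 == a)
      = P.filter (fun q => q.1 == a) ++ [(a, b)] := by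
    rw [List.filter_append]
    simp
  rw [hfilter, List.map_append, List.map_singleton, pvOfListAppendSingleton,
    PySem.Set.add_of_not_mem (by rw [PySem.Set.mem_ofList]; exact hbmem),
    List.map_append, List.map_singleton]
  congr 1
  · apply List.map_congr_left
    intro b' hb'
    have hb'ne : b' ≠ b := by
      intro he
      exact hbmem (he ▸ (PySem.Set.mem_ofList _ b').mp hb')
    have hcnt : (P ++ [(a, b)]).count (a, b') = P.count (a, b') := by
      simp only [List.count_append, List.count_cons, List.count_nil]
      simp
      exact fun h' => hb'ne h'.symm
    rw [hcnt]
  · have h0 : P.count (a, b) = 0 := List.count_eq_zero.mpr h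
    simp [List.count_append, h0]

lemma pvInnerAppendOld (a b : String) (P : List (String × String)) (h : (a, b) ∈ P) :
    pvInner a (P ++ [(a, b)])
      = (pvInner a P).map (fun p => if p.1 == b then (b, (P.count (a, b) : Int) + 1) else p) := by
  have hbmem : b ∈ (P.filter (fun q => q.1 == a)).map (fun q => q.2) := by
    have := (pvInnerMem a b P).mpr h
    rwa [pvInnerKeys, PySem.Set.mem_ofList] at this
  unfold pvInner
  have hfilter : (P ++ [(a, b)]).filter (fun q => q.1 == a)
      = P.filter (fun q => q.1 == a) ++ [(a, b)] := by
    rw [List.filter_append]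
    simp
  rw [hfilter, List.map_append, List.map_singleton, pvOfListAppendSingleton,
    PySem.Set.add_of_mem (by rw [PySem.Set.mem_ofList]; exact hbmem), List.map_map]
  apply List.map_congr_left
  intro b' _
  by_cases hb' : b' = b
  · subst hb'
    simp [List.count_append]
  · have hcnt : (P ++ [(a, b)]).count (a, b') = P.count (a, b') := by
      simp only [List.count_append, List.count_cons, List.count_nil]
      simp
      exact fun h' => hb' h'.symm
    simp [Function.comp, hcnt, hb']

-- the A-side step advances the canonical form
lemma pvAStepCanon (P : List (String × String)) (x : String × String) :
    pvAStep (pvCanon P) x = pvCanon (P ++ [x]) := by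
  obtain ⟨a, b⟩ := x
  have hS : (P ++ [(a, b)]).map (fun q => q.1) = P.map (fun q => q.1) ++ [a] := by simp
  by_cases ha : a ∈ P.map (fun q => q.1)
  · have hc : (pvCanon P).contains a = true := (pvCanonContains P a).mpr ha
    have hgd := pvCanonGetD P a ha
    by_cases hab : (a, b) ∈ P
    · have hic : (PySem.Dict.mk (pvInner a P)).contains b = true := (pvInnerContains a b P).mpr hab
      have hstep : pvAStep (pvCanon P) (a, b)
          = (pvCanon P).insert a
              ((PySem.Dict.mk (pvInner a P)).insert b ((P.count (a, b) : Int) + 1)) := by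
        simp [pvAStep, hc, hgd, hic, pvInnerGetD a b P hab]
      rw [hstep]
      have hinner : (PySem.Dict.mk (pvInner a P)).insert b ((P.count (a, b) : Int) + 1)
          = PySem.Dict.mk (pvInner a (P ++ [(a, b)])) := by
        apply pvDictExt
        rw [PySem.Dict.items_insert_of_contains _ _ hic, pvItemsMk, pvItemsMk,
          pvInnerAppendOld a b P hab]
      rw [hinner]
      apply pvDictExt
      rw [PySem.Dict.items_insert_of_contains _ _ hc]
      simp only [pvCanon, pvItemsMk, List.map_map]
      rw [hS, pvOfListAppendSingleton,
        PySem.Set.add_of_mem (by rw [PySem.Set.mem_ofList]; exact ha)]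
      apply List.map_congr_left
      intro a' ha'
      by_cases haa : a' = a
      · subst haa
        simp [Function.comp]
      · simp [Function.comp, haa, pvInnerAppendOther a' a b P haa]
    · have hic : (PySem.Dict.mk (pvInner a P)).contains b = false :=
        Bool.eq_false_iff.mpr (fun h' => hab ((pvInnerContains a b P).mp h'))
      have hstep : pvAStep (pvCanon P) (a, b)
          = (pvCanon P).insert a
              (((PySem.Dict.mk (pvInner a P)).insert b 0).insert b (0 + 1)) := by
        simp [pvAStep, hc, hgd, hic, PySem.Dict.getD_insert_self]
      rw [hstep, pvInsertInsert]
      have h01 : (0 : Int) + 1 = 1 := rfl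
      rw [h01]
      have hinner : (PySem.Dict.mk (pvInner a P)).insert b 1
          = PySem.Dict.mk (pvInner a (P ++ [(a, b)])) := by
        apply pvDictExt
        rw [PySem.Dict.items_insert_of_not_contains _ _ hic, pvItemsMk, pvItemsMk,
          pvInnerAppendNew a b P hab]
      rw [hinner]
      apply pvDictExt
      rw [PySem.Dict.items_insert_of_contains _ _ hc]
      simp only [pvCanon, pvItemsMk, List.map_map]
      rw [hS, pvOfListAppendSingleton,
        PySem.Set.add_of_mem (by rw [PySem.Set.mem_ofList]; exact ha)]
      apply List.map_congr_left
      intro a' ha'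
      by_cases haa : a' = a
      · subst haa
        simp [Function.comp]
      · simp [Function.comp, haa, pvInnerAppendOther a' a b P haa]
  · have hab : (a, b) ∉ P := fun hmem => ha (List.mem_map_of_mem hmem)
    have hc : (pvCanon P).contains a = false :=
      Bool.eq_false_iff.mpr (fun h' => ha ((pvCanonContains P a).mp h'))
    have hstep : pvAStep (pvCanon P) (a, b)
        = ((pvCanon P).insert a PySem.Dict.empty).insert a
            ((PySem.Dict.empty.insert b 0).insert b (0 + 1)) := by
      simp [pvAStep, hc, PySem.Dict.getD_insert_self, PySem.Dict.contains_empty]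
    have h01 : (0 : Int) + 1 = 1 := rfl
    rw [hstep, pvInsertInsert, pvInsertInsert, h01]
    have hempty : PySem.Dict.empty.insert b (1 : Int) = PySem.Dict.mk [(b, 1)] := by
      apply pvDictExt
      rw [PySem.Dict.items_insert_of_not_contains _ _ (PySem.Dict.contains_empty b)]
      rfl
    rw [hempty]
    apply pvDictExt
    rw [PySem.Dict.items_insert_of_not_contains _ _ hc]
    simp only [pvCanon, pvItemsMk]
    rw [hS, pvOfListAppendSingleton,
      PySem.Set.add_of_not_mem (by rw [PySem.Set.mem_ofList]; exact ha),
      List.map_append, List.map_singleton]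
    congr 1
    · apply List.map_congr_left
      intro a' ha'
      have haa : a' ≠ a := fun he => ha (he ▸ (PySem.Set.mem_ofList _ a').mp ha')
      rw [pvInnerAppendOther a' a b P haa]
    · have hfil : P.filter (fun q => q.1 == a) = [] := by
        apply List.filter_eq_nil_iff.mpr
        intro q hq
        simp only [beq_iff_eq]
        exact fun h' => ha (h' ▸ List.mem_map_of_mem hq)
      have hpv : pvInner a P = [] := by
        unfold pvInner
        rw [hfil]
        rfl
      rw [pvInnerAppendNew a b P hab, hpv]
      rfl

lemma pvAFoldCanon (P : List (String × String)) :
    P.foldl pvAStep PySem.Dict.empty = pvCanon P := by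
  induction P using List.reverseRecOn with
  | nil => rfl
  | append_singleton P x ih => rw [List.foldl_append, List.foldl_cons, List.foldl_nil, ih, pvAStepCanon]

-- the two ports, rewritten through the canonical form
lemma pvPortA (partidas : List (List String)) :
    construir_matriz_transicion partidas
      = (pvCanon (pvPairs partidas)).items.map (fun p => (p.1, p.2.items)) := by
  show (partidas.foldl (fun t l =>
      (PySem.List.pyRange 0 ((l.length : Int) - 1) 1).foldl
        (fun t i => pvAStep t (PySem.List.pyGetD l i "", PySem.List.pyGetD l (i + 1) "")) t)
      PySem.Dict.empty).items.map (fun p => (p.1, p.2.items)) = _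
  have h1 := PySem.List.foldl_congr_mem partidas
    (fun t l =>
      (PySem.List.pyRange 0 ((l.length : Int) - 1) 1).foldl
        (fun t i => pvAStep t (PySem.List.pyGetD l i "", PySem.List.pyGetD l (i + 1) "")) t)
    (fun t l => (l.zip l.tail).foldl pvAStep t)
    PySem.Dict.empty
    (fun acc x _ => pvIdxFoldEqZip x acc)
  rw [h1, ← List.foldl_flatMap,
    show partidas.flatMap (fun l => l.zip l.tail) = pvPairs partidas from rfl,
    pvAFoldCanon]

lemma pvPortB (partidas : List (List String)) :
    construir_matriz_transicion_alt partidas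
      = (pvCanon (pvPairs partidas)).items.map (fun p => (p.1, p.2.items)) := by
  have hpairs : partidas.flatMap
      (fun partida => partida.zip (PySem.List.slice partida (some 1) none)) = pvPairs partidas := by
    unfold pvPairs
    congr 1
    funext l
    rw [PySem.List.slice_from_one]
  show (PySem.Set.ofList ((PySem.Set.ofList (partidas.flatMap
      (fun partida => partida.zip (PySem.List.slice partida (some 1) none)))).map (fun q => q.1))).map
      (fun a => (a, ((PySem.Set.ofList (partidas.flatMap
        (fun partida => partida.zip (PySem.List.slice partida (some 1) none)))).filter
          (fun q => q.1 == a)).map (fun q => (q.2, ((partidas.flatMap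
            (fun partida => partida.zip (PySem.List.slice partida (some 1) none))).count (a, q.2) : Int)))))
      = _
  rw [hpairs]
  unfold pvCanon
  rw [pvItemsMk, List.map_map, pvOfListMapOfList]
  apply List.map_congr_left
  intro a _
  simp only [Function.comp]
  congr 1
  rw [pvOfListFilter,
    pvOfListConstFst a _ (fun q hq => by simpa using (List.mem_filter.mp hq).2),
    List.map_map]
  unfold pvInner
  apply List.map_congr_left
  intro b _
  rfl

-- ===== VERDICT (by name: the statement is the Claim_ definition above) =====
theorem construir_matriz_transicion_spec : Claim_equal_construir_matriz_transicion := by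
  intro partidas _
  unfold Spec_construir_matriz_transicion
  rw [pvPortA, pvPortB]
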